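-- pv_equiv track=rewrite | github.com/Grey16/shiftedup-problems | problem4.py | bigNum
-- ===== SOURCE A (Python) =====
-- def bigNum(a):
-- 	newList = list()
-- 	# turn numbers into strings
-- 	for i in range(len(a)):
-- 		a[i] = str(a[i])
-- 	# rearrange list in decreasing order based on first digit
-- 	for i in range(9, 0, -1):
-- 		for j in range(len(a)):
-- 			if a[j][0] == str(i):
-- 				newList.append(a[j])
-- 	return newList
-- ===== SOURCE B (Python) =====
-- def bigNum(a):
-- 	# same in-place mutation as the original
-- 	for i in range(len(a)):
-- 		a[i] = str(a[i])
-- 	# one pass: group elements by their leading character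
-- 	buckets = {}
-- 	for x in a:
-- 		buckets.setdefault(x[0], []).append(x)
-- 	# concatenate the digit buckets 9..1
-- 	out = []
-- 	for d in range(9, 0, -1):
-- 		out += buckets.get(str(d), [])
-- 	return out
-- ===== Notes on version B (the rewrite author's own statement) =====
-- stated objective: faster
-- what changed: Replaces the 9 full scans of the list (one per leading digit 9..1) by a single grouping pass into a dict of buckets keyed by leading character, then concatenates the digit buckets 9..1.
import Mathlib
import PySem

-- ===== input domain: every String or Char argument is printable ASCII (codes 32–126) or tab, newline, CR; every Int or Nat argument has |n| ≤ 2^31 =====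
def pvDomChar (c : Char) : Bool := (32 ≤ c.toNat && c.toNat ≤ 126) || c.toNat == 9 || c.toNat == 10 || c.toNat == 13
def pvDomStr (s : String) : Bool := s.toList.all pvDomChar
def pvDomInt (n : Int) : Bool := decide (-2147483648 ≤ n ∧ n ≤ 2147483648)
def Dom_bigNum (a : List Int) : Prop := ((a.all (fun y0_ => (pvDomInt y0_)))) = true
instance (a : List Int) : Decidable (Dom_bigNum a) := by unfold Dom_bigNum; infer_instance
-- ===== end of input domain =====

-- B replaces A's 9 passes (one per leading digit 9..1) by one grouping pass into buckets, then
-- concatenates the digit buckets; both mutate the argument in place (ints -> strings), the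
-- equivalence proved here is about the return value (the mutation is identical in both anyway).

-- ===== PORT A =====
-- a[j][0] == str(i): s[0] via pyGet? (none = IndexError, unreachable: str(int) is nonempty),
-- the 1-char string rebuilt with String.mk — exact for the digits 1..9 compared here.
def pvHeadEq (s : String) (i : Int) : Bool :=
  (PySem.Str.pyGet? s 0).map (fun c => String.mk [c]) == some (PySem.Int.toStr i)

def bigNum (a : List Int) : List String :=
  -- for i in range(len(a)): a[i] = str(a[i])
  let as := a.map PySem.Int.toStr
  -- for i in range(9, 0, -1): for j in range(len(a)): if a[j][0] == str(i): newList.append(a[j])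
  (PySem.List.pyRange 9 0 (-1)).foldl
    (fun acc i =>
      (PySem.List.pyRange 0 (as.length : Int) 1).foldl
        (fun acc2 j =>
          if pvHeadEq (PySem.List.pyGetD as j "") i then acc2 ++ [PySem.List.pyGetD as j ""]
          else acc2)
        acc)
    []

-- ===== PORT B =====
-- x[0] as a dict key (1-char string; "" unreachable: str(int) is nonempty)
def pvHead1 (s : String) : String :=
  match PySem.Str.pyGet? s 0 with
  | some c => String.mk [c]
  | none => ""

def bigNum_alt (a : List Int) : List String :=
  let as := a.map PySem.Int.toStr
  -- buckets.setdefault(x[0], []).append(x)  =  buckets[x[0]] = buckets.get(x[0], []) + [x]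
  let buckets := as.foldl (fun d x => d.modify (pvHead1 x) [] (fun l => l ++ [x])) PySem.Dict.empty
  -- for d in range(9, 0, -1): out += buckets.get(str(d), [])
  (PySem.List.pyRange 9 0 (-1)).foldl
    (fun out dd => out ++ buckets.getD (PySem.Int.toStr dd) []) []

-- ===== PRECONDITION & SPEC =====
def Spec_bigNum (a : List Int) (out : List String) : Prop := out = bigNum_alt a
instance (a : List Int) (out : List String) : Decidable (Spec_bigNum a out) := by unfold Spec_bigNum; infer_instance

-- ===== CLAIM (what is proved, stated in full; the proofs are below) =====
def Claim_equal_bigNum : Prop := ∀ (a : List Int), Dom_bigNum a → Spec_bigNum a (bigNum a)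

-- ===== LEMMAS AND PROOFS =====

-- the grouping pass characterised: each bucket is the filter by leading character
lemma buckets_getD (as : List String) (c : String) :
    (as.foldl (fun d x => d.modify (pvHead1 x) [] (fun l => l ++ [x])) PySem.Dict.empty).getD c []
      = as.filter (fun x => pvHead1 x == c) := by
  have h := PySem.Dict.getD_foldl_modify_append
    (l := as.map (fun x => (pvHead1 x, x))) (d := PySem.Dict.empty) (c := c)
  rw [List.foldl_map] at h
  simpa [List.filter_map, Function.comp_def, List.map_map] using h

-- both head tests agree for a concrete digit i with toStr i a nonempty string
lemma headEq_eq (s : String) (i : Int) (hi : PySem.Int.toStr i ≠ "") :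
    pvHeadEq s i = (pvHead1 s == PySem.Int.toStr i) := by
  unfold pvHeadEq pvHead1
  cases h : PySem.Str.pyGet? s 0 with
  | none => simp [Ne.symm hi]
  | some c => simp

-- ===== VERDICT (by name: the statement is the Claim_ definition above) =====
theorem bigNum_spec : Claim_equal_bigNum := by
  intro a _
  unfold Spec_bigNum bigNum bigNum_alt
  set as := a.map PySem.Int.toStr with has
  dsimp only
  apply PySem.List.foldl_congr_mem
  intro acc i hi
  rw [PySem.List.foldl_pyRange_zero_pyGetD' (f := fun acc2 x =>
        if pvHeadEq x i then acc2 ++ [x] else acc2),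
      PySem.List.foldl_append_if_eq_filter, buckets_getD]
  congr 1
  apply List.filter_congr
  intro x _
  have hmem := (PySem.List.mem_pyRange_neg_one).1 hi
  obtain ⟨h1, h2⟩ := hmem
  have : PySem.Int.toStr i ≠ "" := by
    interval_cases i <;> decide
  exact headEq_eq x i this
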